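-- pv_equiv track=rewrite | github.com/jozedu/micro-colony-detection-reproducibility-package | dataset/reproduce_splits.py | assign_group_membership
-- ===== SOURCE A (Python) =====
-- GROUP_NAMES = ("total", "bright", "dark", "vague", "lowres", "highres")
--
-- BG_TO_GROUP = {0: "bright", 1: "dark", 2: "vague", 3: "lowres"}
--
-- def assign_group_membership(
--     curated_ids: set[int],
--     img_map: dict[int, dict],
-- ) -> dict[str, set[int]]:
--     """Return group_name → set of curated image ids in that group."""
--     groups: dict[str, set[int]] = {g: set() for g in GROUP_NAMES}
--
--     for img_id in curated_ids:
--         bg = img_map[img_id]["background_category_id"]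
--         sub_group = BG_TO_GROUP[bg]
--
--         groups["total"].add(img_id)
--         groups[sub_group].add(img_id)
--         if sub_group != "lowres":
--             groups["highres"].add(img_id)
--
--     return groups
-- ===== SOURCE B (Python) =====
-- GROUP_NAMES = ("total", "bright", "dark", "vague", "lowres", "highres")
--
-- # Dual of BG_TO_GROUP: each group is defined by the set of background codes it admits.
-- GROUP_CODES = {
--     "total": (0, 1, 2, 3),
--     "bright": (0,),
--     "dark": (1,),
--     "vague": (2,),
--     "lowres": (3,),
--     "highres": (0, 1, 2),
-- }
--
-- def assign_group_membership(
--     curated_ids: set[int],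
--     img_map: dict[int, dict],
-- ) -> dict[str, set[int]]:
--     """Each group is an independent filter of curated_ids by its admissible codes."""
--     return {
--         group: {
--             img_id
--             for img_id in curated_ids
--             if img_map[img_id]["background_category_id"] in allowed
--         }
--         for group, allowed in GROUP_CODES.items()
--     }
-- ===== Notes on version B (the rewrite author's own statement) =====
-- stated objective: alternative
-- what changed: A makes one pass routing each id into three of six accumulated sets via the BG_TO_GROUP table and an in-loop branch; B has no routing or classification step at all: it defines each group by its set of admissible background codes (the dual table GROUP_CODES) and computes each of the six groups as an independent membership-filter pass over curated_ids.
import Mathlib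
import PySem

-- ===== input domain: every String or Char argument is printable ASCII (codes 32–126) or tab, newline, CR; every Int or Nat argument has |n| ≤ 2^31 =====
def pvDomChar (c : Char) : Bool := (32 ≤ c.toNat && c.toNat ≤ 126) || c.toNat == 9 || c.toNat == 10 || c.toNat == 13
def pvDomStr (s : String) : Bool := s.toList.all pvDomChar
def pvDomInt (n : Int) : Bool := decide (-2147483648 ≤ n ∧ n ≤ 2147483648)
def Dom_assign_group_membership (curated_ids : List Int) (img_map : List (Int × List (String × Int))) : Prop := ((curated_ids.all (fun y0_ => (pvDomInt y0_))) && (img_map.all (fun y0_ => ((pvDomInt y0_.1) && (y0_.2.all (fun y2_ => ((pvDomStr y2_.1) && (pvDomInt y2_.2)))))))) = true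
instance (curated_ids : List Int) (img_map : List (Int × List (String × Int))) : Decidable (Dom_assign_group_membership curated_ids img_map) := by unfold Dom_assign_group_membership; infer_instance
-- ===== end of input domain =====

-- B replaces A's single routing loop (each id added to three of six accumulated sets via the
-- BG_TO_GROUP table and an in-loop branch) by its dual: each group is defined by the list of
-- background codes it admits and computed as an independent membership-filter pass over
-- curated_ids (alternative decomposition, same O(n) cost).

-- ===== PORT A =====
-- module constant BG_TO_GROUP
def pvBG : PySem.Dict Int String :=
  PySem.Dict.mk [(0, "bright"), (1, "dark"), (2, "vague"), (3, "lowres")]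

-- module constant GROUP_NAMES
def pvGroupNames : List String := ["total", "bright", "dark", "vague", "lowres", "highres"]

-- one iteration of A's for-loop; `none` = KeyError (missing img_id / key / background id)
def agmStep (img_map : List (Int × List (String × Int)))
    (groups : PySem.Dict String (PySem.Set Int)) (img_id : Int) :
    Option (PySem.Dict String (PySem.Set Int)) :=
  match (PySem.Dict.mk img_map).get? img_id with
  | none => none
  | some record =>
    match (PySem.Dict.mk record).get? "background_category_id" with
    | none => none
    | some bg =>
      match pvBG.get? bg with
      | none => none
      | some sub_group =>
        let g1 := groups.modify "total" PySem.Set.empty (fun s => PySem.Set.add s img_id)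
        let g2 := g1.modify sub_group PySem.Set.empty (fun s => PySem.Set.add s img_id)
        some (if sub_group ≠ "lowres"
              then g2.modify "highres" PySem.Set.empty (fun s => PySem.Set.add s img_id)
              else g2)

def assign_group_membership (curated_ids : List Int) (img_map : List (Int × List (String × Int))) : List (String × List Int) :=
  let init : PySem.Dict String (PySem.Set Int) :=
    pvGroupNames.foldl (fun d g => d.insert g PySem.Set.empty) PySem.Dict.empty
  match curated_ids.foldl (fun og img_id => og.bind (fun g => agmStep img_map g img_id)) (some init) with
  | none => []      -- Python raises KeyError here: excluded by Pre_
  | some groups => groups.items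

-- ===== PORT B =====
-- module constant GROUP_CODES: group name → list of admissible background codes
def pvGroupCodes : List (String × List Int) :=
  [("total", [0, 1, 2, 3]), ("bright", [0]), ("dark", [1]),
   ("vague", [2]), ("lowres", [3]), ("highres", [0, 1, 2])]

-- img_map[img_id]["background_category_id"]; `none` = KeyError (excluded by Pre_; on such
-- inputs Python B raises mid-comprehension, so the port's value there is not claimed)
def agmCode (img_map : List (Int × List (String × Int))) (img_id : Int) : Option Int :=
  ((PySem.Dict.mk img_map).get? img_id).bind fun record =>
    (PySem.Dict.mk record).get? "background_category_id"

-- the comprehension filter: img_map[img_id]["background_category_id"] in allowed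
def agmMember (allowed : List Int) (img_map : List (Int × List (String × Int))) (img_id : Int) : Bool :=
  match agmCode img_map img_id with
  | some c => allowed.contains c
  | none => false

def assign_group_membership_alt (curated_ids : List Int) (img_map : List (Int × List (String × Int))) : List (String × List Int) :=
  pvGroupCodes.map (fun p => (p.1, curated_ids.filter (agmMember p.2 img_map)))

-- ===== PRECONDITION & SPEC =====
-- Pre_ holds exactly where the Python A returns: curated_ids.Nodup only restates the type
-- convention (curated_ids is a Python set, so the list holds distinct elements); the rest
-- excludes exactly A's KeyErrors (a curated id missing from img_map, a record without the
-- "background_category_id" key, or a background id outside 0..3).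
def Pre_assign_group_membership (curated_ids : List Int) (img_map : List (Int × List (String × Int))) : Prop :=
  curated_ids.Nodup ∧
  (curated_ids.all fun img_id =>
    match (PySem.Dict.mk img_map).get? img_id with
    | none => false
    | some record =>
      match (PySem.Dict.mk record).get? "background_category_id" with
      | none => false
      | some bg => decide (bg = 0 ∨ bg = 1 ∨ bg = 2 ∨ bg = 3)) = true
instance (curated_ids : List Int) (img_map : List (Int × List (String × Int))) : Decidable (Pre_assign_group_membership curated_ids img_map) := by unfold Pre_assign_group_membership; infer_instance

def pvWitness_assign_group_membership : List Int × (List (Int × List (String × Int))) :=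
  ([1, 2], [(1, [("background_category_id", 0)]), (2, [("background_category_id", 3)])])

def Spec_assign_group_membership (curated_ids : List Int) (img_map : List (Int × List (String × Int))) (out : List (String × List Int)) : Prop := out = assign_group_membership_alt curated_ids img_map
instance (curated_ids : List Int) (img_map : List (Int × List (String × Int))) (out : List (String × List Int)) : Decidable (Spec_assign_group_membership curated_ids img_map out) := by unfold Spec_assign_group_membership; infer_instance

-- ===== CLAIM (what is proved, stated in full; the proofs are below) =====
def Claim_equal_assign_group_membership : Prop := ∀ (curated_ids : List Int) (img_map : List (Int × List (String × Int))), Dom_assign_group_membership curated_ids img_map → Pre_assign_group_membership curated_ids img_map → Spec_assign_group_membership curated_ids img_map (assign_group_membership curated_ids img_map)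


-- ===== LEMMAS AND PROOFS =====

-- A's groups dict after processing the ids of p, expressed through B's per-group filters
def agmAssembleF (img_map : List (Int × List (String × Int))) (p : List Int) :
    PySem.Dict String (PySem.Set Int) :=
  PySem.Dict.mk (pvGroupCodes.map (fun q => (q.1, p.filter (agmMember q.2 img_map))))

lemma agm_add_notmem (p : List Int) (f : Int → Bool) (id : Int) (hp : id ∉ p) :
    PySem.Set.add (p.filter f) id = p.filter f ++ [id] := by
  have : id ∉ p.filter f := fun h => hp (List.mem_of_mem_filter h)
  simp [PySem.Set.add, PySem.Set.contains, this]

lemma agmStepF (img_map : List (Int × List (String × Int))) (p : List Int) (id bg : Int)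
    (hg : agmCode img_map id = some bg) (hbg : bg = 0 ∨ bg = 1 ∨ bg = 2 ∨ bg = 3)
    (hp : id ∉ p) :
    agmStep img_map (agmAssembleF img_map p) id = some (agmAssembleF img_map (p ++ [id])) := by
  unfold agmCode at hg
  cases hrec : (PySem.Dict.mk img_map).get? id with
  | none => rw [hrec] at hg; simp at hg
  | some record =>
  rw [hrec] at hg
  simp only [Option.bind_some] at hg
  have hmem : ∀ allowed : List Int, agmMember allowed img_map id = allowed.contains bg := by
    intro allowed; unfold agmMember agmCode; rw [hrec]; simp [hg]
  rcases hbg with hb | hb | hb | hb <;> subst hb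
  · have hpv : pvBG.get? 0 = some "bright" := by rfl
    simp only [agmStep, hrec, hg, hpv]
    simp [agmAssembleF, pvGroupCodes, PySem.Dict.modify, PySem.Dict.contains,
      PySem.Dict.getD, PySem.Dict.get?, PySem.Dict.insert, List.filter_append,
      hmem, agm_add_notmem _ _ _ hp]
  · have hpv : pvBG.get? 1 = some "dark" := by rfl
    simp only [agmStep, hrec, hg, hpv]
    simp [agmAssembleF, pvGroupCodes, PySem.Dict.modify, PySem.Dict.contains,
      PySem.Dict.getD, PySem.Dict.get?, PySem.Dict.insert, List.filter_append,
      hmem, agm_add_notmem _ _ _ hp]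
  · have hpv : pvBG.get? 2 = some "vague" := by rfl
    simp only [agmStep, hrec, hg, hpv]
    simp [agmAssembleF, pvGroupCodes, PySem.Dict.modify, PySem.Dict.contains,
      PySem.Dict.getD, PySem.Dict.get?, PySem.Dict.insert, List.filter_append,
      hmem, agm_add_notmem _ _ _ hp]
  · have hpv : pvBG.get? 3 = some "lowres" := by rfl
    simp only [agmStep, hrec, hg, hpv]
    simp [agmAssembleF, pvGroupCodes, PySem.Dict.modify, PySem.Dict.contains,
      PySem.Dict.getD, PySem.Dict.get?, PySem.Dict.insert, List.filter_append,
      hmem, agm_add_notmem _ _ _ hp]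

lemma agm_loopF (img_map : List (Int × List (String × Int))) (ids : List Int) (p : List Int)
    (hnd : (p ++ ids).Nodup)
    (hpre : ∀ id ∈ ids, ∃ bg, agmCode img_map id = some bg ∧ (bg = 0 ∨ bg = 1 ∨ bg = 2 ∨ bg = 3)) :
    ids.foldl (fun og img_id => og.bind (fun g => agmStep img_map g img_id))
        (some (agmAssembleF img_map p)) = some (agmAssembleF img_map (p ++ ids)) := by
  induction ids generalizing p with
  | nil => simp
  | cons id rest ih =>
    obtain ⟨bg, hg, hbg⟩ := hpre id List.mem_cons_self
    have hp : id ∉ p := by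
      intro h
      have := List.Nodup.of_append_right (l₁ := p) (by simpa using hnd)
      have hd := List.disjoint_of_nodup_append hnd
      exact hd h List.mem_cons_self
    have hstep := agmStepF img_map p id bg hg hbg hp
    have hnd' : ((p ++ [id]) ++ rest).Nodup := by simpa using hnd
    have := ih (p ++ [id]) hnd' (fun i hi => hpre i (List.mem_cons_of_mem _ hi))
    simpa [List.foldl_cons, hstep] using this

-- ===== VERDICT (by name: the statement is the Claim_ definition above) =====
theorem assign_group_membership_spec : Claim_equal_assign_group_membership := by
  intro curated_ids img_map _ hpre
  obtain ⟨hnd, hall⟩ := hpre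
  unfold Spec_assign_group_membership
  have hpre' : ∀ id ∈ curated_ids, ∃ bg, agmCode img_map id = some bg ∧ (bg = 0 ∨ bg = 1 ∨ bg = 2 ∨ bg = 3) := by
    intro id hid
    have := List.all_eq_true.mp hall id hid
    unfold agmCode
    cases hrec : (PySem.Dict.mk img_map).get? id with
    | none => rw [hrec] at this; simp at this
    | some record =>
      rw [hrec] at this
      simp only [] at this
      simp only [Option.bind_some]
      cases hbg : (PySem.Dict.mk record).get? "background_category_id" with
      | none => rw [hbg] at this; simp at this
      | some bg =>
        rw [hbg] at this
        simp only [] at this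
        simp only [decide_eq_true_eq] at this
        exact ⟨bg, rfl, this⟩
  have hinit : (pvGroupNames.foldl (fun d g => d.insert g PySem.Set.empty) PySem.Dict.empty)
      = agmAssembleF img_map [] := by
    simp [agmAssembleF, pvGroupCodes]; decide
  have hloop := agm_loopF img_map curated_ids [] (by simpa using hnd) hpre'
  unfold assign_group_membership assign_group_membership_alt
  simp only [hinit, List.nil_append] at *
  simp only [hloop]
  rfl
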